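-- pv_equiv track=rewrite | github.com/zsc/v2_pos_pinyin_demo | pinyinize/core.py | _build_max_len_by_first_char
-- ===== SOURCE A (Python) =====
-- def _build_max_len_by_first_char(words: dict[str, str]) -> dict[str, int]:
--     out: dict[str, int] = {}
--     for w in words.keys():
--         if not w:
--             continue
--         fc = w[0]
--         out[fc] = max(out.get(fc, 0), len(w))
--     return out
-- ===== SOURCE B (Python) =====
-- def _build_max_len_by_first_char(words: dict[str, str]) -> dict[str, int]:
--     # Phase 1: collect the distinct first characters in first-occurrence order.
--     firsts: list[str] = []
--     for w in words:
--         if w and w[0] not in firsts: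
--             firsts.append(w[0])
--
--     # Phase 2: for each first character, scan for the longest word starting with it.
--     def longest(fc: str) -> int:
--         m = 0
--         for w in words:
--             if w and w[0] == fc:
--                 m = max(m, len(w))
--         return m
--
--     return {fc: longest(fc) for fc in firsts}
-- ===== Notes on version B (the rewrite author's own statement) =====
-- stated objective: alternative
-- what changed: A builds the result in one pass with a running max stored in a dict; B first collects the distinct first characters in first-occurrence order and then, for each one, re-scans the whole word list for the maximum word length, with no incremental dict updates.
import Mathlib
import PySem

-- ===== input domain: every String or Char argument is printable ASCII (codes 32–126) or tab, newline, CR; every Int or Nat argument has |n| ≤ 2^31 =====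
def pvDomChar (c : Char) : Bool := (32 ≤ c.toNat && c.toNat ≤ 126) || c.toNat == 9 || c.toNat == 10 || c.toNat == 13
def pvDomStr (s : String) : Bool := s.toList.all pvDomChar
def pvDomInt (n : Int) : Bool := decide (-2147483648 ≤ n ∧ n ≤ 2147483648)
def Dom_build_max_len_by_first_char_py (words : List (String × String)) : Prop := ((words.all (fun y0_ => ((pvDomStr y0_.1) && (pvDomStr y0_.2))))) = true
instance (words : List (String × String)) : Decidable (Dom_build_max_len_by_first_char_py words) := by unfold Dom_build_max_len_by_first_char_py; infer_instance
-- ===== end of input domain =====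

-- B replaces A's single-pass running-max dict update by a two-phase scheme (collect distinct
-- first characters in order, then scan for each one's maximum length): an alternative
-- decomposition, not claimed faster.

-- ===== PORT A =====
-- one iteration of A's loop body: 'if not w: continue; fc = w[0]; out[fc] = max(out.get(fc, 0), len(w))'
def pvStepA (out : PySem.Dict String Int) (kv : String × String) : PySem.Dict String Int :=
  match kv.1.toList with
  | [] => out
  | c :: _ => out.insert (String.ofList [c]) (max (out.getD (String.ofList [c]) 0) (PySem.Str.len kv.1))

-- iterating over words.keys() is ported as the fold over the association list's entries
def build_max_len_by_first_char_py (words : List (String × String)) : List (String × Int) :=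
  (words.foldl pvStepA PySem.Dict.empty).items

-- ===== PORT B =====
-- one iteration of B's first loop: 'if w and w[0] not in firsts: firsts.append(w[0])'
def pvFirstsStep (acc : List String) (kv : String × String) : List String :=
  match kv.1.toList with
  | [] => acc
  | c :: _ => if String.ofList [c] ∈ acc then acc else acc ++ [String.ofList [c]]

-- one iteration of B's inner loop: 'if w and w[0] == fc: m = max(m, len(w))'
def pvLongStep (fc : String) (m : Int) (kv : String × String) : Int :=
  match kv.1.toList with
  | [] => m
  | c :: _ => if String.ofList [c] = fc then max m (PySem.Str.len kv.1) else m

-- B's helper 'longest'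
def pvLongest (words : List (String × String)) (fc : String) : Int :=
  words.foldl (pvLongStep fc) 0

def build_max_len_by_first_char_py_alt (words : List (String × String)) : List (String × Int) :=
  (words.foldl pvFirstsStep []).map (fun fc => (fc, pvLongest words fc))

-- ===== PRECONDITION & SPEC =====
def Spec_build_max_len_by_first_char_py (words : List (String × String)) (out : List (String × Int)) : Prop := out = build_max_len_by_first_char_py_alt words
instance (words : List (String × String)) (out : List (String × Int)) : Decidable (Spec_build_max_len_by_first_char_py words out) := by unfold Spec_build_max_len_by_first_char_py; infer_instance

-- ===== CLAIM (what is proved, stated in full; the proofs are below) =====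
def Claim_equal_build_max_len_by_first_char_py : Prop := ∀ (words : List (String × String)), Dom_build_max_len_by_first_char_py words → Spec_build_max_len_by_first_char_py words (build_max_len_by_first_char_py words)

-- ===== LEMMAS AND PROOFS =====

-- the new first characters of ws not already in 'seen', in first-occurrence order
def pvG : List (String × String) → List String → List String
  | [], _ => []
  | kv :: ws, seen =>
    match kv.1.toList with
    | [] => pvG ws seen
    | c :: _ =>
      if String.ofList [c] ∈ seen then pvG ws seen
      else String.ofList [c] :: pvG ws (seen ++ [String.ofList [c]])

theorem pvG_not_mem_seen (ws : List (String × String)) (seen : List String) (x : String)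
    (hx : x ∈ pvG ws seen) : x ∉ seen := by
  induction ws generalizing seen with
  | nil => simp [pvG] at hx
  | cons kv ws ih =>
    unfold pvG at hx
    cases h : kv.1.toList with
    | nil => simp [h] at hx; exact ih seen hx
    | cons c rest =>
      simp [h] at hx
      by_cases hm : String.ofList [c] ∈ seen
      · simp [hm] at hx; exact ih seen hx
      · simp [hm] at hx
        rcases hx with rfl | hx
        · exact hm
        · intro hs; exact ih _ hx (by simp [hs])

theorem pvFirsts_eq_G (ws : List (String × String)) (acc : List String) :
    ws.foldl pvFirstsStep acc = acc ++ pvG ws acc := by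
  induction ws generalizing acc with
  | nil => simp [pvG]
  | cons kv ws ih =>
    rw [List.foldl_cons, ih]
    cases h : kv.1.toList with
    | nil => simp [pvFirstsStep, pvG, h]
    | cons c rest =>
      by_cases hm : String.ofList [c] ∈ acc
      · simp [pvFirstsStep, pvG, h, hm]
      · simp [pvFirstsStep, pvG, h, hm]

theorem get?_of_mem_items (d : PySem.Dict String Int) (p : String × Int)
    (hnd : d.keys.Nodup) (hp : p ∈ d.items) : d.get? p.1 = some p.2 := by
  obtain ⟨items⟩ := d
  simp only [PySem.Dict.get?] at *
  induction items with
  | nil => simp at hp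
  | cons q qs ih =>
    simp only [PySem.Dict.keys, List.map_cons, List.nodup_cons] at hnd
    rcases List.mem_cons.mp hp with rfl | hp
    · simp [List.find?]
    · have hne : (q.1 == p.1) = false := by
        simp only [beq_eq_false_iff_ne]; intro he
        exact hnd.1 (by simpa [he] using List.mem_map_of_mem (f := Prod.fst) hp)
      simp only [List.find?, hne]
      refine ih ?_ hp
      simpa [PySem.Dict.keys] using hnd.2

theorem fst_mem_keys (d : PySem.Dict String Int) (p : String × Int) (hp : p ∈ d.items) :
    p.1 ∈ d.keys := by
  simp only [PySem.Dict.keys]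
  exact List.mem_map_of_mem (f := Prod.fst) hp

theorem foldA_items (ws : List (String × String)) (out : PySem.Dict String Int)
    (hnd : out.keys.Nodup) :
    (ws.foldl pvStepA out).items
      = out.items.map (fun p => (p.1, ws.foldl (pvLongStep p.1) p.2))
        ++ (pvG ws out.keys).map (fun fc => (fc, ws.foldl (pvLongStep fc) 0)) := by
  induction ws generalizing out with
  | nil => simp [pvG]
  | cons kv ws ih =>
    rw [List.foldl_cons]
    cases h : kv.1.toList with
    | nil =>
      have hs : pvStepA out kv = out := by simp [pvStepA, h]
      rw [hs, ih out hnd]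
      simp [pvG, pvLongStep, h]
    | cons c rest =>
      have hs : pvStepA out kv
          = out.insert (String.ofList [c])
              (max (out.getD (String.ofList [c]) 0) (PySem.Str.len kv.1)) := by
        simp [pvStepA, h]
      by_cases hc : out.contains (String.ofList [c]) = true
      · -- the first character was seen before: insert overwrites in place
        have hkeys : (pvStepA out kv).keys = out.keys := by
          rw [hs]; exact PySem.Dict.keys_insert_of_contains out _ hc
        have hnd' : (pvStepA out kv).keys.Nodup := by
          rw [hs]; exact PySem.Dict.nodup_keys_insert _ _ _ hnd
        rw [ih _ hnd', hkeys]
        have hitems : (pvStepA out kv).items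
            = out.items.map (fun p =>
                if (p.1 == String.ofList [c]) = true
                then (String.ofList [c], max (out.getD (String.ofList [c]) 0) (PySem.Str.len kv.1))
                else p) := by
          rw [hs]; exact PySem.Dict.items_insert_of_contains out _ hc
        rw [hitems, List.map_map]
        congr 1
        · refine List.map_congr_left (fun p hp => ?_)
          by_cases hpc : p.1 = String.ofList [c]
          · have hget : out.getD p.1 0 = p.2 := by
              simp [PySem.Dict.getD, get?_of_mem_items out p hnd hp]
            simp only [Function.comp_apply, hpc, beq_self_eq_true, if_true]
            rw [List.foldl_cons]
            simp [pvLongStep, h, ← hpc, hget]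
          · simp only [Function.comp_apply, beq_eq_false_iff_ne.mpr (by simpa using hpc),
              Bool.false_eq_true, if_false]
            rw [List.foldl_cons]
            simp [pvLongStep, h, Ne.symm hpc]
        · have hGeq : pvG (kv :: ws) out.keys = pvG ws out.keys := by
            simp [pvG, h, (PySem.Dict.contains_iff_mem_keys out _).mp hc]
          rw [hGeq]
          refine List.map_congr_left (fun fc hfc => ?_)
          have hne : fc ≠ String.ofList [c] := by
            intro he
            exact pvG_not_mem_seen ws out.keys fc hfc
              (he ▸ (PySem.Dict.contains_iff_mem_keys out _).mp hc)
          rw [List.foldl_cons]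
          simp [pvLongStep, h, Ne.symm hne]
      · -- a new first character: insert appends
        have hc' : out.contains (String.ofList [c]) = false := by
          simpa using hc
        have hget0 : out.getD (String.ofList [c]) 0 = 0 := by
          simp [PySem.Dict.getD, (PySem.Dict.get?_eq_none_iff_contains out _).mpr hc']
        have hkeys : (pvStepA out kv).keys = out.keys ++ [String.ofList [c]] := by
          rw [hs]; exact PySem.Dict.keys_insert_of_not_contains out _ hc'
        have hnd' : (pvStepA out kv).keys.Nodup := by
          rw [hs]; exact PySem.Dict.nodup_keys_insert _ _ _ hnd
        have hnmem : String.ofList [c] ∉ out.keys := by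
          intro hmem
          exact absurd ((PySem.Dict.contains_iff_mem_keys out _).mpr hmem) (by simp [hc'])
        have hitems : (pvStepA out kv).items
            = out.items ++ [(String.ofList [c], max 0 (PySem.Str.len kv.1))] := by
          rw [hs, PySem.Dict.items_insert_of_not_contains out _ hc', hget0]
        rw [ih _ hnd', hkeys, hitems, List.map_append]
        have hGeq : pvG (kv :: ws) out.keys
            = String.ofList [c] :: pvG ws (out.keys ++ [String.ofList [c]]) := by
          simp [pvG, h, hnmem]
        rw [hGeq, List.map_cons, List.append_assoc]
        congr 1
        · refine List.map_congr_left (fun p hp => ?_)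
          have hne : p.1 ≠ String.ofList [c] := by
            intro he; exact hnmem (he ▸ fst_mem_keys out p hp)
          rw [List.foldl_cons]
          simp [pvLongStep, h, Ne.symm hne]
        · simp only [List.map_cons, List.foldl_cons, List.map_nil, List.cons_append,
            List.nil_append]
          congr 1
          · simp [pvLongStep, h]
          · refine List.map_congr_left (fun fc hfc => ?_)
            have hne : fc ≠ String.ofList [c] := by
              intro he
              exact pvG_not_mem_seen ws _ fc hfc (by simp [he])
            simp [pvLongStep, h, Ne.symm hne]

-- ===== VERDICT (by name: the statement is the Claim_ definition above) =====
theorem build_max_len_by_first_char_py_spec : Claim_equal_build_max_len_by_first_char_py := by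
  intro words _
  unfold Spec_build_max_len_by_first_char_py build_max_len_by_first_char_py build_max_len_by_first_char_py_alt
  rw [foldA_items words PySem.Dict.empty (by simp [PySem.Dict.empty, PySem.Dict.keys])]
  rw [pvFirsts_eq_G]
  simp [PySem.Dict.empty, PySem.Dict.keys, pvLongest]
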